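-- pv_equiv track=rewrite | github.com/benrosenberg/benrosenberg.github.io | posts/int_sequences_and_knight_moves/integer_sequences_and_knight_walks.py | first_n_palindromes_base_2
-- ===== SOURCE A (Python) =====
-- def first_n_palindromes_base_2(n):
--     out = []
--     i = 1
--     while len(out) < n:
--         bin_i = bin(i)[2:]
--         if bin_i == bin_i[::-1]:
--             out.append(i)
--         i += 1
--     return out
-- ===== SOURCE B (Python) =====
-- def first_n_palindromes_base_2(n):
--     # Construct binary palindromes directly from their upper half, by length then value.
--     out = []
--     L = 1
--     while len(out) < n:
--         k = (L + 1) // 2          # upper-half length (includes middle bit for odd L)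
--         shift = L - k
--         for h in range(2 ** (k - 1), 2 ** k):
--             t = h // 2 ** (L % 2)  # drop the middle bit for odd L
--             r = 0
--             for _ in range(shift):
--                 r = 2 * r + t % 2
--                 t //= 2
--             out.append(h * 2 ** shift + r)
--         L += 1
--     return out[:n]
-- ===== Notes on version B (the rewrite author's own statement) =====
-- stated objective: faster
-- what changed: A scans all integers upward from one and tests each binary representation for being a palindrome; B never tests anything: it constructs the palindromes directly, by bit-length and then by upper half (mirroring the half arithmetically), so only palindromes are ever produced.
import Mathlib
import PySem

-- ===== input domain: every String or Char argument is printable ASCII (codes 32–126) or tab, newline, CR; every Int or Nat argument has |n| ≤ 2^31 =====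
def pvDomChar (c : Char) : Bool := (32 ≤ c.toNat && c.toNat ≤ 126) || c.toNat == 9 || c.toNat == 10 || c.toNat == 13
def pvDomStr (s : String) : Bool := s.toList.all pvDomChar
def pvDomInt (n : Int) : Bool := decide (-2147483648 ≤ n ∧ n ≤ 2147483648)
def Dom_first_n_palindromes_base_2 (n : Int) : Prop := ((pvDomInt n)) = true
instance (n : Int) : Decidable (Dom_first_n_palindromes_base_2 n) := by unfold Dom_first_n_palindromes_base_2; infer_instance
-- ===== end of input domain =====

-- B constructs each binary palindrome directly from its upper half (by length, then half value)
-- instead of A's scan of every integer with a palindrome test; measurably faster (asymptotically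
-- fewer candidates: only palindromes are ever produced).

-- ===== PORT A =====
-- bin(i)[2:] as an MSB-first binary digit list (exact for every i ≥ 1; A's loop starts at i = 1)
def toBin (i : Nat) : List Nat :=
  if i = 0 then [] else toBin (i / 2) ++ [i % 2]
decreasing_by exact Nat.div_lt_self (by omega) (by omega)

-- implementation fuel for A's while-loop; proven sufficient below (lemma count_pals_fuel)
def fuelA (n : Nat) : Nat := 2 ^ (2 * (toBin n).length + 1)

-- the while-loop of A: out collects palindromes, i is the candidate counter
def loopA (n : Nat) : Nat → Nat → List Nat → List Nat
  | 0, _, out => out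
  | fuel + 1, i, out =>
    if out.length < n then
      loopA n fuel (i + 1) (if toBin i = (toBin i).reverse then out ++ [i] else out)
    else out

def first_n_palindromes_base_2 (n : Int) : List Int :=
  (loopA n.toNat (fuelA n.toNat) 1 []).map (fun x => (x : Int))

-- ===== PORT B =====
-- the inner 'for _ in range(m)' bit-reversal loop of B
def revBits : Nat → Nat → Nat → Nat
  | 0, r, _ => r
  | m + 1, r, t => revBits m (2 * r + t % 2) (t / 2)

-- one pass of B's 'for h in range(...)' body: all binary palindromes of bit-length L, in order
def blockB (L : Nat) : List Nat :=
  (List.range' (2 ^ ((L + 1) / 2 - 1)) (2 ^ ((L + 1) / 2 - 1))).map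
    (fun h => h * 2 ^ (L - (L + 1) / 2) + revBits (L - (L + 1) / 2) 0 (h / 2 ^ (L % 2)))

theorem blockB_length (L : Nat) : (blockB L).length = 2 ^ ((L + 1) / 2 - 1) := by
  simp [blockB]

-- the outer while-loop of B, by length L; terminates since every block is nonempty
def loopB (n L : Nat) (out : List Nat) : List Nat :=
  if out.length < n then loopB n (L + 1) (out ++ blockB L) else out
termination_by n - out.length
decreasing_by
  have h1 : 0 < (blockB L).length := by rw [blockB_length]; positivity
  simp only [List.length_append]; omega

def first_n_palindromes_base_2_alt (n : Int) : List Int :=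
  ((loopB n.toNat 1 []).take n.toNat).map (fun x => (x : Int))

-- ===== PRECONDITION & SPEC =====
def Spec_first_n_palindromes_base_2 (n : Int) (out : List Int) : Prop := out = first_n_palindromes_base_2_alt n
instance (n : Int) (out : List Int) : Decidable (Spec_first_n_palindromes_base_2 n out) := by unfold Spec_first_n_palindromes_base_2; infer_instance

-- ===== CLAIM (what is proved, stated in full; the proofs are below) =====
def Claim_equal_first_n_palindromes_base_2 : Prop := ∀ (n : Int), Dom_first_n_palindromes_base_2 n → Spec_first_n_palindromes_base_2 n (first_n_palindromes_base_2 n)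

-- ===== LEMMAS AND PROOFS =====

-- the palindromes among s, s+1, …, s+len-1, in increasing order
def pals (s len : Nat) : List Nat :=
  (List.range' s len).filter (fun x => decide (toBin x = (toBin x).reverse))

-- A's loop collects exactly the first (n - out.length) palindromes of its scan range
-- two strictly increasing lists with the same members are equal
theorem sorted_ext (l1 l2 : List Nat) (h : l1.Nodup) (h2 : l2.Nodup)
    (h3 : ∀ a, a ∈ l1 ↔ a ∈ l2)
    (s1 : l1.Pairwise (· < ·)) (s2 : l2.Pairwise (· < ·)) : l1 = l2 := by
  have hp : List.Perm l1 l2 := (List.perm_ext_iff_of_nodup h h2).2 h3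
  exact hp.eq_of_pairwise (fun a b _ _ h1 h2 => le_antisymm h1 h2)
    (s1.imp le_of_lt) (s2.imp le_of_lt)

theorem loopA_eq (n : Nat) : ∀ (fuel i : Nat) (out : List Nat),
    loopA n fuel i out = out ++ (pals i fuel).take (n - out.length) := by
  intro fuel
  induction fuel with
  | zero => intro i out; simp [loopA, pals]
  | succ fuel ih =>
    intro i out
    rw [loopA]
    by_cases h : out.length < n
    · rw [if_pos h]
      have hr : List.range' i (fuel + 1) = i :: List.range' (i + 1) fuel :=
        List.range'_succ ..
      by_cases hpal : toBin i = (toBin i).reverse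
      · rw [if_pos hpal, ih]
        have hd := decide_eq_true hpal
        have hc : pals i (fuel + 1) = i :: pals (i + 1) fuel := by
          unfold pals
          rw [hr, List.filter_cons, hd]
          simp
        have hn : n - out.length = (n - (out ++ [i]).length) + 1 := by
          simp only [List.length_append, List.length_cons, List.length_nil]; omega
        rw [hc, hn, List.take_succ_cons]
        simp
      · rw [if_neg hpal, ih]
        have hd := decide_eq_false hpal
        have hc : pals i (fuel + 1) = pals (i + 1) fuel := by
          unfold pals
          rw [hr, List.filter_cons, hd]
          simp
        rw [hc]
    · rw [if_neg h]
      have hz : n - out.length = 0 := by omega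
      simp [hz]

-- MSB-first binary digits of b, zero-padded to width m
def pad : Nat → Nat → List Nat
  | 0, _ => []
  | m + 1, b => pad m (b / 2) ++ [b % 2]

theorem pad_length (m b : Nat) : (pad m b).length = m := by
  induction m generalizing b with
  | zero => rfl
  | succ m ih => simp [pad, ih]

theorem toBin_eq_pad (m : Nat) : ∀ x, 2 ^ m ≤ x → x < 2 ^ (m + 1) → toBin x = pad (m + 1) x := by
  induction m with
  | zero =>
    intro x h1 h2
    have hx : x = 1 := by omega
    subst hx
    have h0 : toBin 0 = [] := by rw [toBin]; rfl
    have h1 : toBin 1 = [1] := by rw [toBin]; simp [h0]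
    rw [h1]
    rfl
  | succ m ih =>
    intro x h1 h2
    rw [toBin, if_neg (by have := Nat.one_le_two_pow (n := m + 1); omega)]
    have hd1 : 2 ^ m ≤ x / 2 := by
      rw [Nat.le_div_iff_mul_le (by omega)]
      calc 2 ^ m * 2 = 2 ^ (m + 1) := by ring
        _ ≤ x := h1
    have hd2 : x / 2 < 2 ^ (m + 1) := by
      rw [Nat.div_lt_iff_lt_mul (by omega)]
      calc x < 2 ^ (m + 1 + 1) := h2
        _ = 2 ^ (m + 1) * 2 := by ring
    rw [ih (x / 2) hd1 hd2]
    rfl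

theorem lt_two_pow_toBin_length (i : Nat) : i < 2 ^ (toBin i).length := by
  induction i using Nat.strong_induction_on with
  | _ i ih =>
    by_cases h : i = 0
    · subst h; rw [toBin]; simp
    · rw [toBin, if_neg h]
      have h2 := ih (i / 2) (Nat.div_lt_self (by omega) (by omega))
      simp only [List.length_append, List.length_cons, List.length_nil, pow_succ]
      omega

theorem pad_append (a b x : Nat) : pad (a + b) x = pad a (x / 2 ^ b) ++ pad b (x % 2 ^ b) := by
  induction b generalizing x with
  | zero => simp [pad]
  | succ b ih =>
    show pad (a + b + 1) x = _
    rw [pad, ih (x / 2)]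
    have e1 : x / 2 / 2 ^ b = x / 2 ^ (b + 1) := by
      rw [Nat.div_div_eq_div_mul, pow_succ, mul_comm]
    have e2 : x / 2 % 2 ^ b = x % 2 ^ (b + 1) / 2 := by
      have := Nat.mod_mul_right_div_self x 2 (2 ^ b)
      rw [← this, pow_succ, mul_comm]
    have e3 : x % 2 = x % 2 ^ (b + 1) % 2 := by
      rw [Nat.mod_mod_of_dvd _ (dvd_pow_self 2 (by omega))]
    rw [e1, e2, e3]
    simp [pad]

theorem revBits_acc (m : Nat) : ∀ r t, revBits m r t = r * 2 ^ m + revBits m 0 t := by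
  induction m with
  | zero => intro r t; simp [revBits]
  | succ m ih =>
    intro r t
    show revBits m _ _ = r * 2 ^ (m + 1) + revBits m _ _
    rw [ih (2 * r + t % 2) (t / 2), ih (2 * 0 + t % 2) (t / 2)]
    ring

theorem revBits_lt (m : Nat) : ∀ t, revBits m 0 t < 2 ^ m := by
  induction m with
  | zero => intro t; simp [revBits]
  | succ m ih =>
    intro t
    show revBits m (2 * 0 + t % 2) (t / 2) < 2 ^ (m + 1)
    rw [revBits_acc]
    have h1 := ih (t / 2)
    have h2 : t % 2 < 2 := Nat.mod_lt _ (by omega)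
    have : (2 * 0 + t % 2) * 2 ^ m ≤ 1 * 2 ^ m := by
      apply Nat.mul_le_mul_right; omega
    simp only [pow_succ]
    omega

theorem pad_reverse (m : Nat) : ∀ t, (pad m t).reverse = pad m (revBits m 0 t) := by
  induction m with
  | zero => intro t; rfl
  | succ m ih =>
    intro t
    have hx : revBits (m + 1) 0 t = (t % 2) * 2 ^ m + revBits m 0 (t / 2) := by
      show revBits m (2 * 0 + t % 2) (t / 2) = _
      rw [revBits_acc]; ring_nf
    have hR := revBits_lt m (t / 2)
    have hdiv : revBits (m + 1) 0 t / 2 ^ m = t % 2 := by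
      rw [hx, add_comm, Nat.add_mul_div_right _ _ (Nat.two_pow_pos m), Nat.div_eq_of_lt hR]; omega
    have hmod : revBits (m + 1) 0 t % 2 ^ m = revBits m 0 (t / 2) := by
      rw [hx, add_comm, Nat.add_mul_mod_self_right, Nat.mod_eq_of_lt hR]
    rw [show pad (m + 1) t = pad m (t / 2) ++ [t % 2] from rfl]
    rw [show pad (m + 1) (revBits (m + 1) 0 t)
          = pad (1 + m) (revBits (m + 1) 0 t) from by rw [Nat.add_comm],
        pad_append, hdiv, hmod, ← ih]
    have h1 : pad 1 (t % 2) = [t % 2 % 2] := rfl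
    simp [h1, Nat.mod_mod_of_dvd, List.reverse_append]

theorem pad_inj (m : Nat) : ∀ b c, b < 2 ^ m → c < 2 ^ m → pad m b = pad m c → b = c := by
  induction m with
  | zero => intro b c hb hc _; simp at hb hc; omega
  | succ m ih =>
    intro b c hb hc heq
    have h2 := List.append_inj' heq (by rfl)
    have hm : b % 2 = c % 2 := by
      have := h2.2; simpa using this
    have hd : b / 2 = c / 2 := by
      refine ih (b / 2) (c / 2) ?_ ?_ h2.1 <;>
        · rw [Nat.div_lt_iff_lt_mul (by omega)]
          rw [pow_succ] at *
          omega
    omega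

-- palindrome characterisation: an L-bit number is a binary palindrome iff it is B's
-- construction applied to its own upper half
theorem pal_char (k shift p x : Nat) (hp : p ≤ 1) (hk : k = shift + p) (hk1 : 1 ≤ k)
    (hlo : 2 ^ (k + shift - 1) ≤ x) (hhi : x < 2 ^ (k + shift)) :
    (toBin x = (toBin x).reverse) ↔
      x = (x / 2 ^ shift) * 2 ^ shift + revBits shift 0 ((x / 2 ^ shift) / 2 ^ p) := by
  have hL1 : 1 ≤ k + shift := by omega
  have hxeq : (x / 2 ^ shift) * 2 ^ shift + x % 2 ^ shift = x := Nat.div_add_mod' x (2 ^ shift)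
  have hlolt : x % 2 ^ shift < 2 ^ shift := Nat.mod_lt _ (Nat.two_pow_pos shift)
  have htb : toBin x = pad (k + shift) x := by
    have h1 := toBin_eq_pad (k + shift - 1) x hlo (by rw [show k + shift - 1 + 1 = k + shift from by omega]; exact hhi)
    rw [h1, show k + shift - 1 + 1 = k + shift from by omega]
  have hsplit : pad (k + shift) x = pad k (x / 2 ^ shift) ++ pad shift (x % 2 ^ shift) :=
    pad_append k shift x
  have hksplit : pad k (x / 2 ^ shift) =
      pad shift (x / 2 ^ shift / 2 ^ p) ++ pad p (x / 2 ^ shift % 2 ^ p) := by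
    rw [hk]; exact pad_append shift p (x / 2 ^ shift)
  rw [htb]
  constructor
  · intro hpal
    have e2 : (pad (k + shift) x).take shift = pad shift (x / 2 ^ shift / 2 ^ p) := by
      rw [hsplit, hksplit, List.append_assoc]
      exact List.take_left' (pad_length ..)
    have e3 : ((pad (k + shift) x).reverse).take shift = (pad shift (x % 2 ^ shift)).reverse := by
      rw [hsplit, List.reverse_append]
      exact List.take_left' (by simp [pad_length])
    have e4 : pad shift (x / 2 ^ shift / 2 ^ p) = (pad shift (x % 2 ^ shift)).reverse := by
      rw [← e2, ← e3, ← hpal]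
    have e5 : pad shift (x % 2 ^ shift) = pad shift (revBits shift 0 (x / 2 ^ shift / 2 ^ p)) := by
      rw [← pad_reverse, e4, List.reverse_reverse]
    have e6 : x % 2 ^ shift = revBits shift 0 (x / 2 ^ shift / 2 ^ p) :=
      pad_inj shift _ _ hlolt (revBits_lt ..) e5
    omega
  · intro hx2
    have e6 : x % 2 ^ shift = revBits shift 0 (x / 2 ^ shift / 2 ^ p) := by omega
    have hrev : pad shift (x % 2 ^ shift) = (pad shift (x / 2 ^ shift / 2 ^ p)).reverse := by
      rw [pad_reverse shift (x / 2 ^ shift / 2 ^ p), e6]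
    have hpp : (pad p (x / 2 ^ shift % 2 ^ p)).reverse = pad p (x / 2 ^ shift % 2 ^ p) := by
      interval_cases p
      · rfl
      · simp [pad]
    rw [hsplit, hksplit, List.reverse_append, List.reverse_append, hrev,
      List.reverse_reverse, hpp]
    simp [List.append_assoc]

theorem blockB_eq (L : Nat) (hL : 1 ≤ L) : blockB L = pals (2 ^ (L - 1)) (2 ^ (L - 1)) := by
  have hk1 : 1 ≤ (L + 1) / 2 := by omega
  have hk : (L + 1) / 2 = (L - (L + 1) / 2) + L % 2 := by omega
  have hp : L % 2 ≤ 1 := by omega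
  have hLs : (L + 1) / 2 + (L - (L + 1) / 2) = L := by omega
  have hrevlt := revBits_lt (L - (L + 1) / 2)
  have hpow : 2 ^ ((L + 1) / 2 - 1) * 2 ^ (L - (L + 1) / 2) = 2 ^ (L - 1) := by
    rw [← pow_add, show (L + 1) / 2 - 1 + (L - (L + 1) / 2) = L - 1 from by omega]
  have hpow2 : 2 ^ ((L + 1) / 2) * 2 ^ (L - (L + 1) / 2) = 2 ^ L := by
    rw [← pow_add, show (L + 1) / 2 + (L - (L + 1) / 2) = L from by omega]
  have hdb : 2 ^ (L - 1) + 2 ^ (L - 1) = 2 ^ L := by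
    rw [← two_mul, ← pow_succ', show L - 1 + 1 = L from by omega]
  have hdk : 2 ^ ((L + 1) / 2 - 1) + 2 ^ ((L + 1) / 2 - 1) = 2 ^ ((L + 1) / 2) := by
    rw [← two_mul, ← pow_succ', show (L + 1) / 2 - 1 + 1 = (L + 1) / 2 from by omega]
  have hmono : ∀ a b : Nat, a < b →
      a * 2 ^ (L - (L + 1) / 2) + revBits (L - (L + 1) / 2) 0 (a / 2 ^ (L % 2)) <
      b * 2 ^ (L - (L + 1) / 2) + revBits (L - (L + 1) / 2) 0 (b / 2 ^ (L % 2)) := by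
    intro a b hab
    have h1 := hrevlt (a / 2 ^ (L % 2))
    have h2 : (a + 1) * 2 ^ (L - (L + 1) / 2) ≤ b * 2 ^ (L - (L + 1) / 2) :=
      Nat.mul_le_mul_right _ (by omega)
    have h3 : (a + 1) * 2 ^ (L - (L + 1) / 2)
        = a * 2 ^ (L - (L + 1) / 2) + 2 ^ (L - (L + 1) / 2) := by ring
    omega
  apply sorted_ext
  · exact (List.pairwise_map.2 ((List.pairwise_lt_range').imp
      (fun hab => hmono _ _ hab))).imp Nat.ne_of_lt
  · exact ((List.pairwise_lt_range').filter _).imp Nat.ne_of_lt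
  · intro a
    simp only [blockB, List.mem_map, pals, List.mem_filter, List.mem_range'_1,
      decide_eq_true_eq]
    constructor
    · rintro ⟨h, ⟨hh1, hh2⟩, rfl⟩
      have hh2' : h < 2 ^ ((L + 1) / 2) := by omega
      have hr := hrevlt (h / 2 ^ (L % 2))
      have hxlo : 2 ^ (L - 1) ≤ h * 2 ^ (L - (L + 1) / 2)
          + revBits (L - (L + 1) / 2) 0 (h / 2 ^ (L % 2)) := by
        have hA := Nat.mul_le_mul_right (2 ^ (L - (L + 1) / 2)) hh1
        rw [hpow] at hA
        omega
      have hxhi : h * 2 ^ (L - (L + 1) / 2)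
          + revBits (L - (L + 1) / 2) 0 (h / 2 ^ (L % 2)) < 2 ^ L := by
        have h2 : (h + 1) * 2 ^ (L - (L + 1) / 2) ≤ 2 ^ ((L + 1) / 2) * 2 ^ (L - (L + 1) / 2) :=
          Nat.mul_le_mul_right _ (by omega)
        rw [hpow2] at h2
        have h3 : (h + 1) * 2 ^ (L - (L + 1) / 2)
            = h * 2 ^ (L - (L + 1) / 2) + 2 ^ (L - (L + 1) / 2) := by ring
        omega
      refine ⟨⟨hxlo, by omega⟩, ?_⟩
      have hdiv : (h * 2 ^ (L - (L + 1) / 2)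
          + revBits (L - (L + 1) / 2) 0 (h / 2 ^ (L % 2))) / 2 ^ (L - (L + 1) / 2) = h := by
        rw [add_comm, Nat.add_mul_div_right _ _ (Nat.two_pow_pos _),
          Nat.div_eq_of_lt (hrevlt _)]
        omega
      rw [pal_char ((L + 1) / 2) (L - (L + 1) / 2) (L % 2) _ hp hk hk1
        (by rw [hLs]; exact hxlo) (by rw [hLs]; omega), hdiv]
    · rintro ⟨⟨ha1, ha2⟩, hpal⟩
      have ha2' : a < 2 ^ L := by omega
      rw [pal_char ((L + 1) / 2) (L - (L + 1) / 2) (L % 2) a hp hk hk1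
        (by rw [hLs]; exact ha1) (by rw [hLs]; exact ha2')] at hpal
      refine ⟨a / 2 ^ (L - (L + 1) / 2), ⟨?_, ?_⟩, hpal.symm⟩
      · rw [Nat.le_div_iff_mul_le (Nat.two_pow_pos _), hpow]; exact ha1
      · have hlt : a / 2 ^ (L - (L + 1) / 2) < 2 ^ ((L + 1) / 2) := by
          rw [Nat.div_lt_iff_lt_mul (Nat.two_pow_pos _), hpow2]; exact ha2'
        omega
  · exact List.pairwise_map.2 ((List.pairwise_lt_range').imp (fun hab => hmono _ _ hab))
  · exact (List.pairwise_lt_range').filter _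

theorem pals_append (s a b : Nat) : pals s a ++ pals (s + a) b = pals s (a + b) := by
  unfold pals
  rw [← List.filter_append]
  congr 1
  simpa using @List.range'_append s a b 1

-- blocks for lengths 1..j glue to the filtered range [1, 2^j)
def flatB (L j : Nat) : List Nat := (List.range' L j).flatMap blockB

theorem flatB_eq (j : Nat) : flatB 1 j = pals 1 (2 ^ j - 1) := by
  induction j with
  | zero => simp [flatB, pals]
  | succ j ih =>
    have h1 : 1 ≤ 2 ^ j := Nat.one_le_two_pow
    have hr : List.range' 1 (j + 1) = List.range' 1 j ++ [1 + j] := by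
      have := @List.range'_append 1 j 1 1
      simp at this
      rw [← this]
    rw [flatB, hr, List.flatMap_append]
    have hb : List.flatMap blockB [1 + j] = blockB (1 + j) := by simp
    rw [hb, blockB_eq (1 + j) (by omega)]
    rw [show List.flatMap blockB (List.range' 1 j) = pals 1 (2 ^ j - 1) from ih]
    rw [show (1 + j - 1) = j from by omega]
    have hpa := pals_append 1 (2 ^ j - 1) (2 ^ j)
    rw [show (1 : Nat) + (2 ^ j - 1) = 2 ^ j from by omega] at hpa
    rw [hpa, show (2 ^ j - 1) + 2 ^ j = 2 ^ (j + 1) - 1 from by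
      have h2 : 2 ^ (j + 1) = 2 * 2 ^ j := by rw [pow_succ]; ring
      omega]

theorem loopB_eq (n : Nat) : ∀ (L : Nat) (out : List Nat),
    ∃ j, loopB n L out = out ++ flatB L j ∧ n ≤ (out ++ flatB L j).length := by
  intro L out
  induction L, out using loopB.induct n with
  | case1 L out h ih =>
    obtain ⟨j, h1, h2⟩ := ih
    have hf : flatB L (j + 1) = blockB L ++ flatB (L + 1) j := by
      rw [flatB, flatB, List.range'_succ, List.flatMap_cons]
    refine ⟨j + 1, ?_, ?_⟩
    · rw [loopB, if_pos h, h1, hf, List.append_assoc]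
    · simp only [hf, List.length_append] at h2 ⊢
      omega
  | case2 L out h =>
    refine ⟨0, ?_, ?_⟩
    · rw [loopB, if_neg h]; simp [flatB]
    · simp [flatB]; omega

theorem count_pals_fuel (n : Nat) : n ≤ (pals 1 (fuelA n - 1)).length := by
  have hfa : fuelA n - 1 = 2 ^ (2 * (toBin n).length + 1) - 1 := rfl
  rw [hfa, ← flatB_eq]
  have hsplit : flatB 1 (2 * (toBin n).length + 1)
      = flatB 1 (2 * (toBin n).length) ++ blockB (1 + 2 * (toBin n).length) := by
    rw [flatB, flatB]
    have := @List.range'_append 1 (2 * (toBin n).length) 1 1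
    simp at this
    rw [← this, List.flatMap_append]
    simp
  rw [hsplit]
  have hbl : (blockB (1 + 2 * (toBin n).length)).length = 2 ^ (toBin n).length := by
    rw [blockB_length]; congr 1; omega
  have hn := lt_two_pow_toBin_length n
  simp only [List.length_append, hbl]
  omega

theorem pals_take (n a b : Nat) (hab : a ≤ b) (hn : n ≤ (pals 1 a).length) :
    (pals 1 b).take n = (pals 1 a).take n := by
  have h1 : pals 1 a ++ pals (1 + a) (b - a) = pals 1 b := by
    rw [pals_append, show a + (b - a) = b from by omega]
  rw [← h1, List.take_append_of_le_length hn]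

theorem main_nat (n : Nat) : loopA n (fuelA n) 1 [] = (loopB n 1 []).take n := by
  obtain ⟨j, hB, hlen⟩ := loopB_eq n 1 []
  rw [loopA_eq, hB]
  simp only [List.nil_append]
  rw [flatB_eq] at hlen ⊢
  simp only [List.nil_append] at hlen
  have hA := count_pals_fuel n
  rcases le_total (2 ^ j - 1) (fuelA n - 1) with h | h
  · exact pals_take n (2 ^ j - 1) (fuelA n) (by omega) hlen
  · calc (pals 1 (fuelA n)).take n
        = (pals 1 (fuelA n - 1)).take n := pals_take n _ _ (by omega) hA
      _ = (pals 1 (2 ^ j - 1)).take n := (pals_take n (fuelA n - 1) (2 ^ j - 1) h hA).symm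

-- ===== VERDICT (by name: the statement is the Claim_ definition above) =====
theorem first_n_palindromes_base_2_spec : Claim_equal_first_n_palindromes_base_2 := by
  intro n _
  unfold Spec_first_n_palindromes_base_2 first_n_palindromes_base_2 first_n_palindromes_base_2_alt
  rw [main_nat]
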